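-- pv_equiv track=rewrite | github.com/ElderMedic/openHZAU | PYTHON/作业/贪婪算法 (1).py | dir_graph
-- ===== SOURCE A (Python) =====
-- def get_weight(s1,s2):              #通过两条序列的重叠计算出权值
--     l = min(len(s1),len(s2))
--     while l>0:
--         if s2[:l] == s1[-l:]:
--             return l
--         else:
--             l-=1
--     return 0
--
-- def dir_graph(l,t=3):             #得到满足条件的有向图(权值大于等于t)
--     graph = {}
--     for i in l:
--         for j in l:
--             if i!=j:
--                 weight = get_weight(i,j)
--                 if weight >= t:
--                     key = (i,j)
--                     graph[key] = weight
--     return graph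
-- ===== SOURCE B (Python) =====
-- def _overlap(s1, s2):
--     # longest l with s2[:l] == s1[-l:], via the KMP prefix function of s2 + sep + s1
--     s = s2 + "\x00" + s1
--     pi = [0]
--     k = 0
--     for i in range(1, len(s)):
--         c = s[i]
--         while k > 0 and s[k] != c:
--             k = pi[k - 1]
--         if s[k] == c:
--             k += 1
--         pi.append(k)
--     return k
--
-- def dir_graph(l, t=3):
--     graph = {}
--     for i in l:
--         for j in l:
--             if i != j:
--                 weight = _overlap(i, j)
--                 if weight >= t:
--                     graph[(i, j)] = weight
--     return graph
-- ===== Notes on version B (the rewrite author's own statement) =====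
-- stated objective: alternative
-- what changed: The per-pair overlap get_weight, which tries every candidate length longest-first with a slice comparison, is replaced by a single KMP prefix-function pass over s2 + '\x00' + s1 whose final value is the overlap; the graph-building loops are unchanged.
import Mathlib
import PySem

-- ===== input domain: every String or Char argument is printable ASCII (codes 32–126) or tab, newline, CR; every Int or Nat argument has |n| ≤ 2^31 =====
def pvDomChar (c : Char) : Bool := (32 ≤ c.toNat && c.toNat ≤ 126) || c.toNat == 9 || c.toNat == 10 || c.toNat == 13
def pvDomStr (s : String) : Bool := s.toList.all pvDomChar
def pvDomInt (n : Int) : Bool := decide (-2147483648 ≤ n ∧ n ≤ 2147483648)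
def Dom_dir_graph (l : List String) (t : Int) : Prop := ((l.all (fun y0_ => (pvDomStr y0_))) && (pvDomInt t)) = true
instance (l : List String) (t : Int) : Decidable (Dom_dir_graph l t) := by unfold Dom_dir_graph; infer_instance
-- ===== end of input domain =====

-- B computes each pair's overlap with the KMP prefix function of s2 ++ '\x00' :: s1 instead of
-- A's longest-first slice comparisons; the graph-building loops are unchanged.

-- ===== PORT A =====
-- while l>0: if s2[:l] == s1[-l:] return l else l -= 1; return 0   (recursion on l)
def gwLoop (s1 s2 : List Char) : Nat → Int
  | 0 => 0
  | l + 1 =>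
    if PySem.List.slice s2 none (some ((l : Int) + 1)) =
       PySem.List.slice s1 (some (-((l : Int) + 1))) none then ((l : Int) + 1)
    else gwLoop s1 s2 l

def get_weight (s1 s2 : String) : Int :=
  gwLoop s1.toList s2.toList (min s1.toList.length s2.toList.length)

def dir_graph (l : List String) (t : Int) : List (String × String × Int) :=
  ((l.foldl (fun g i =>
      l.foldl (fun g j =>
        if i ≠ j then
          let weight := get_weight i j
          if weight ≥ t then g.insert (i, j) weight else g
        else g) g) (PySem.Dict.empty : PySem.Dict (String × String) Int)).items).map
    (fun p => (p.1.1, p.1.2, p.2))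

-- ===== PORT B =====
-- while k > 0 and s[k] != c: k = pi[k-1]     (fuel = k is always enough: pi[j] ≤ j, so k decreases)
def kmpWhile (s : List Char) (pi : List Nat) (c : Char) : Nat → Nat → Nat
  | 0, k => k
  | fuel + 1, k =>
    if 0 < k ∧ s.getD k ' ' ≠ c then kmpWhile s pi c fuel (pi.getD (k - 1) 0) else k

-- for i in range(1, len(s)): … pi.append(k)   (s[i] / s[k] are always in range; getD is exact there)
def kmpLoop (s : List Char) (pi : List Nat) (k : Nat) (i : Nat) : Nat :=
  if h : i < s.length then
    let c := s.getD i ' '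
    let k1 := kmpWhile s pi c k k
    let k2 := if s.getD k1 ' ' = c then k1 + 1 else k1
    kmpLoop s (pi ++ [k2]) k2 (i + 1)
  else k
termination_by s.length - i

def overlap_alt (s1 s2 : String) : Int :=
  let s := s2.toList ++ '\x00' :: s1.toList
  (kmpLoop s [0] 0 1 : Nat)

def dir_graph_alt (l : List String) (t : Int) : List (String × String × Int) :=
  ((l.foldl (fun g i =>
      l.foldl (fun g j =>
        if i ≠ j then
          let weight := overlap_alt i j
          if weight ≥ t then g.insert (i, j) weight else g
        else g) g) (PySem.Dict.empty : PySem.Dict (String × String) Int)).items).map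
    (fun p => (p.1.1, p.1.2, p.2))

-- ===== PRECONDITION & SPEC =====
def Spec_dir_graph (l : List String) (t : Int) (out : List (String × String × Int)) : Prop := out = dir_graph_alt l t
instance (l : List String) (t : Int) (out : List (String × String × Int)) : Decidable (Spec_dir_graph l t out) := by unfold Spec_dir_graph; infer_instance

-- ===== CLAIM (what is proved, stated in full; the proofs are below) =====
def Claim_equal_dir_graph : Prop := ∀ (l : List String) (t : Int), Dom_dir_graph l t → Spec_dir_graph l t (dir_graph l t)

-- ===== LEMMAS AND PROOFS =====

-- `Pb s k`: the length-k prefix of s equals its length-k suffix (a border, when k ≤ s.length).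
abbrev Pb (s : List Char) (k : Nat) : Prop := s.take k = s.drop (s.length - k)

-- longest proper border of s
def bord (s : List Char) : Nat :=
  Nat.findGreatest (fun k => s.take k = s.drop (s.length - k)) (s.length - 1)

theorem Pb_zero (s : List Char) : Pb s 0 := by simp [Pb]

theorem bord_le (s : List Char) : bord s ≤ s.length - 1 := Nat.findGreatest_le _

theorem bord_lt (s : List Char) (h : s ≠ []) : bord s < s.length := by
  have := bord_le s
  have : 0 < s.length := List.length_pos_iff.mpr h
  omega

theorem bord_spec (s : List Char) : Pb s (bord s) :=
  Nat.findGreatest_spec (Nat.zero_le _) (Pb_zero s)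

theorem Pb_le_bord (s : List Char) (k : Nat) (hk : k < s.length) (h : Pb s k) : k ≤ bord s :=
  Nat.le_findGreatest (by omega) h

theorem drop_take_of_Pb (s : List Char) (b k : Nat) (hb : Pb s b) (hbl : b ≤ s.length)
    (hk : k ≤ b) : (s.take b).drop (b - k) = s.drop (s.length - k) := by
  rw [hb, List.drop_drop]
  congr 1
  omega

theorem Pb_trans (s : List Char) (b k : Nat) (h1 : Pb (s.take b) k) (h2 : Pb s b)
    (hk : k ≤ b) (hb : b ≤ s.length) : Pb s k := by
  have hlen : (s.take b).length = b := by rw [List.length_take]; omega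
  have ht : (s.take b).take k = s.take k := by rw [List.take_take, min_eq_left hk]
  rw [Pb, ← ht, h1, hlen, drop_take_of_Pb s b k h2 hb hk]

theorem Pb_down (s : List Char) (b k : Nat) (h1 : Pb s b) (h2 : Pb s k)
    (hk : k ≤ b) (hb : b ≤ s.length) : Pb (s.take b) k := by
  have hlen : (s.take b).length = b := by rw [List.length_take]; omega
  have ht : (s.take b).take k = s.take k := by rw [List.take_take, min_eq_left hk]
  rw [Pb, ht, hlen, h2, drop_take_of_Pb s b k h1 hb hk]

theorem Pb_ext (t : List Char) (c : Char) (k : Nat) (hk : k < t.length) :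
    Pb (t ++ [c]) (k + 1) ↔ (Pb t k ∧ t.getD k ' ' = c) := by
  have hlen : (t ++ [c]).length = t.length + 1 := by simp
  have htake : (t ++ [c]).take (k + 1) = t.take k ++ [t[k]] := by
    rw [List.take_append_of_le_length (by omega), List.take_add_one,
      List.getElem?_eq_getElem hk]
    rfl
  have hdrop : (t ++ [c]).drop ((t ++ [c]).length - (k + 1)) = t.drop (t.length - k) ++ [c] := by
    rw [hlen]
    have : t.length + 1 - (k + 1) = t.length - k := by omega
    rw [this, List.drop_append_of_le_length (by omega)]
  have hgetD : t.getD k ' ' = t[k] := by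
    rw [List.getD_eq_getElem?_getD, List.getElem?_eq_getElem hk]
    rfl
  constructor
  · intro h
    rw [Pb, htake, hdrop] at h
    have hl : (t.take k).length = (t.drop (t.length - k)).length := by
      rw [List.length_take, List.length_drop]; omega
    obtain ⟨h1, h2⟩ := List.append_inj h (by rw [List.length_take, List.length_drop]; omega)
    refine ⟨h1, ?_⟩
    rw [hgetD]
    exact (List.cons.injEq _ _ _ _).mp h2 |>.1
  · rintro ⟨h1, h2⟩
    rw [Pb, htake, hdrop, h1, ← hgetD, h2]

theorem kmpWhile_spec (s : List Char) (pi : List Nat) (c : Char) (i : Nat)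
    (_hi1 : 1 ≤ i) (hil : i < s.length)
    (hpi : ∀ j, j + 1 ≤ i → pi.getD j 0 = bord (s.take (j + 1))) :
    ∀ fuel k, k ≤ fuel → k < i → Pb (s.take i) k →
      (∀ m, m < i → Pb (s.take i) m → s.getD m ' ' = c → m ≤ k) →
      (Pb (s.take i) (kmpWhile s pi c fuel k) ∧ kmpWhile s pi c fuel k < i ∧
       (∀ m, m < i → Pb (s.take i) m → s.getD m ' ' = c → m ≤ kmpWhile s pi c fuel k) ∧
       (kmpWhile s pi c fuel k = 0 ∨ s.getD (kmpWhile s pi c fuel k) ' ' = c)) := by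
  intro fuel
  induction fuel with
  | zero =>
    intro k hkf hki hPb hmax
    have hk0 : k = 0 := by omega
    subst hk0
    exact ⟨hPb, hki, hmax, Or.inl rfl⟩
  | succ fuel ih =>
    intro k hkf hki hPb hmax
    by_cases hcond : 0 < k ∧ s.getD k ' ' ≠ c
    · rw [kmpWhile, if_pos hcond]
      have hklen : k ≤ s.length := by omega
      have htk : s.take k = (s.take i).take k := by
        rw [List.take_take, min_eq_left (by omega)]
      have hpik : pi.getD (k - 1) 0 = bord (s.take k) := by
        have := hpi (k - 1) (by omega)
        rwa [Nat.sub_add_cancel hcond.1] at this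
      have hlenk : (s.take k).length = k := by rw [List.length_take]; omega
      have hne : s.take k ≠ [] := by
        intro h
        rw [h] at hlenk
        simp at hlenk
        omega
      have hblt : bord (s.take k) < k := by
        have := bord_lt (s.take k) hne
        omega
      set k' := pi.getD (k - 1) 0 with hk'
      have hk'b : k' = bord (s.take k) := hpik
      have hPbk' : Pb (s.take i) k' := by
        apply Pb_trans (s.take i) k k'
        · rw [← htk, hk'b]
          exact bord_spec _
        · exact hPb
        · omega
        · rw [List.length_take]; omega
      have hmax' : ∀ m, m < i → Pb (s.take i) m → s.getD m ' ' = c → m ≤ k' := by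
        intro m hm hPm hmc
        have hmk : m ≤ k := hmax m hm hPm hmc
        have hmne : m ≠ k := by
          intro h
          exact hcond.2 (h ▸ hmc)
        have hmlt : m < k := by omega
        have : Pb ((s.take i).take k) m := by
          apply Pb_down (s.take i) k m hPb hPm (by omega)
          rw [List.length_take]; omega
        rw [← htk] at this
        have := Pb_le_bord (s.take k) m (by omega) this
        omega
      exact ih k' (by omega) (by omega) hPbk' hmax'
    · rw [kmpWhile, if_neg hcond]
      refine ⟨hPb, hki, hmax, ?_⟩
      by_cases h0 : k = 0
      · exact Or.inl h0
      · rw [not_and_or, not_not] at hcond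
        rcases hcond with h | h
        · omega
        · exact Or.inr h

theorem kmpStep (s : List Char) (pi : List Nat) (i : Nat)
    (hi1 : 1 ≤ i) (hil : i < s.length)
    (hpi : ∀ j, j + 1 ≤ i → pi.getD j 0 = bord (s.take (j + 1))) :
    (if s.getD (kmpWhile s pi (s.getD i ' ') (bord (s.take i)) (bord (s.take i))) ' ' = s.getD i ' '
     then kmpWhile s pi (s.getD i ' ') (bord (s.take i)) (bord (s.take i)) + 1
     else kmpWhile s pi (s.getD i ' ') (bord (s.take i)) (bord (s.take i))) = bord (s.take (i + 1)) := by
  have htlen : (s.take i).length = i := by rw [List.length_take]; omega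
  have htne : s.take i ≠ [] := by
    intro h; rw [h] at htlen; simp at htlen; omega
  have hblt : bord (s.take i) < i := by have := bord_lt _ htne; omega
  have hgetDt : ∀ m, m < i → (s.take i).getD m ' ' = s.getD m ' ' := by
    intro m hm
    rw [List.getD_eq_getElem?_getD, List.getD_eq_getElem?_getD, List.getElem?_take_of_lt hm]
  have hmax0 : ∀ m, m < i → Pb (s.take i) m → s.getD m ' ' = (s.getD i ' ') → m ≤ bord (s.take i) := by
    intro m hm hPm _
    exact Pb_le_bord _ m (by omega) hPm
  obtain ⟨hPbr, hri, hmax, hexit⟩ :=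
    kmpWhile_spec s pi (s.getD i ' ') i hi1 hil hpi (bord (s.take i)) (bord (s.take i))
      le_rfl hblt (bord_spec _) hmax0
  set r := kmpWhile s pi (s.getD i ' ') (bord (s.take i)) (bord (s.take i)) with hr
  have htake1 : s.take (i + 1) = s.take i ++ [s.getD i ' '] := by
    rw [List.take_add_one, List.getElem?_eq_getElem hil, List.getD_eq_getElem?_getD,
      List.getElem?_eq_getElem hil]
    rfl
  have hlen1 : (s.take (i + 1)).length = i + 1 := by rw [List.length_take]; omega
  have hbord1 : bord (s.take (i + 1)) =
      Nat.findGreatest (fun k => Pb (s.take (i + 1)) k) i := by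
    have h : (s.take (i + 1)).length - 1 = i := by omega
    rw [bord, h]
  by_cases hc : s.getD r ' ' = s.getD i ' '
  · rw [if_pos hc, hbord1]
    symm
    rw [Nat.findGreatest_eq_iff]
    refine ⟨by omega, fun _ => ?_, fun n hn1 hn2 hPn => ?_⟩
    · rw [htake1]
      exact (Pb_ext (s.take i) (s.getD i ' ') r (by omega)).mpr
        ⟨hPbr, by rw [hgetDt r hri]; exact hc⟩
    · rcases n with _ | m
      · omega
      · rw [htake1] at hPn
        obtain ⟨hPm, hmc⟩ := (Pb_ext (s.take i) (s.getD i ' ') m (by omega)).mp hPn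
        have := hmax m (by omega) hPm (by rw [← hgetDt m (by omega)]; exact hmc)
        omega
  · have hr0 : r = 0 := by
      rcases hexit with h | h
      · exact h
      · exact absurd h hc
    rw [if_neg hc, hr0, hbord1]
    symm
    rw [Nat.findGreatest_eq_zero_iff]
    intro n hn1 hn2 hPn
    rcases n with _ | m
    · omega
    · rw [htake1] at hPn
      obtain ⟨hPm, hmc⟩ := (Pb_ext (s.take i) (s.getD i ' ') m (by omega)).mp hPn
      have hm0 : m = 0 := by
        have := hmax m (by omega) hPm (by rw [← hgetDt m (by omega)]; exact hmc)
        omega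
      subst hm0
      rw [hgetDt 0 (by omega)] at hmc
      rw [hr0] at hc
      exact hc hmc

theorem kmpLoop_spec (s : List Char) :
    ∀ n i pi k, s.length - i ≤ n → 1 ≤ i → i ≤ s.length → pi.length = i →
      (∀ j, j + 1 ≤ i → pi.getD j 0 = bord (s.take (j + 1))) →
      k = bord (s.take i) → kmpLoop s pi k i = bord s := by
  intro n
  induction n with
  | zero =>
    intro i pi k hn h1 h2 _ _ hk
    have hie : i = s.length := by omega
    rw [kmpLoop, dif_neg (by omega), hk, hie, List.take_length]
  | succ n ih =>
    intro i pi k hn h1 h2 hlen hpi hk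
    by_cases hi : i < s.length
    · rw [kmpLoop, dif_pos hi]
      show kmpLoop s
        (pi ++ [if s.getD (kmpWhile s pi (s.getD i ' ') k k) ' ' = s.getD i ' '
                then kmpWhile s pi (s.getD i ' ') k k + 1
                else kmpWhile s pi (s.getD i ' ') k k])
        (if s.getD (kmpWhile s pi (s.getD i ' ') k k) ' ' = s.getD i ' '
         then kmpWhile s pi (s.getD i ' ') k k + 1
         else kmpWhile s pi (s.getD i ' ') k k) (i + 1) = bord s
      have hk2 : (if s.getD (kmpWhile s pi (s.getD i ' ') k k) ' ' = s.getD i ' '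
                  then kmpWhile s pi (s.getD i ' ') k k + 1
                  else kmpWhile s pi (s.getD i ' ') k k) = bord (s.take (i + 1)) := by
        rw [hk]
        exact kmpStep s pi i h1 hi hpi
      rw [hk2]
      apply ih (i + 1) (pi ++ [bord (s.take (i + 1))]) (bord (s.take (i + 1)))
        (by omega) (by omega) (by omega) (by simp [hlen])
      · intro j hj
        rcases Nat.lt_or_ge j pi.length with hjl | hjr
        · rw [List.getD_eq_getElem?_getD, List.getElem?_append_left hjl,
            ← List.getD_eq_getElem?_getD]
          exact hpi j (by omega)
        · have hje : j = i := by omega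
          subst hje
          rw [List.getD_eq_getElem?_getD, List.getElem?_append_right hjr, hlen,
            Nat.sub_self]
          rfl
      · rfl
    · have hie : i = s.length := by omega
      rw [kmpLoop, dif_neg (by omega), hk, hie, List.take_length]

theorem overlap_alt_eq_bord (s1 s2 : String) :
    overlap_alt s1 s2 = (bord (s2.toList ++ '\x00' :: s1.toList) : Nat) := by
  have hlen : (s2.toList ++ '\x00' :: s1.toList).length = s2.toList.length + (s1.toList.length + 1) := by
    simp
  have hne : (s2.toList ++ '\x00' :: s1.toList).length ≥ 1 := by omega
  rw [overlap_alt]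
  congr 1
  apply kmpLoop_spec (s2.toList ++ '\x00' :: s1.toList)
    ((s2.toList ++ '\x00' :: s1.toList).length - 1) 1 [0] 0 (by omega) le_rfl (by omega) rfl
  · intro j hj
    have hj0 : j = 0 := by omega
    subst hj0
    have h1 : ((s2.toList ++ '\x00' :: s1.toList).take 1).length = 1 := by
      rw [List.length_take]; omega
    rw [bord, h1]
    rfl
  · have h1 : ((s2.toList ++ '\x00' :: s1.toList).take 1).length = 1 := by
      rw [List.length_take]; omega
    rw [bord, h1]
    rfl

theorem findGreatest_congr (P Q : Nat → Prop) [DecidablePred P] [DecidablePred Q] (n : Nat)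
    (h : ∀ k, k ≤ n → (P k ↔ Q k)) : Nat.findGreatest P n = Nat.findGreatest Q n := by
  induction n with
  | zero => rfl
  | succ n ih =>
    rw [Nat.findGreatest_succ, Nat.findGreatest_succ]
    by_cases hp : P (n + 1)
    · rw [if_pos hp, if_pos ((h (n + 1) le_rfl).mp hp)]
    · rw [if_neg hp, if_neg (fun hq => hp ((h (n + 1) le_rfl).mpr hq)),
        ih (fun k hk => h k (by omega))]

theorem findGreatest_eq_of_not (P : Nat → Prop) [DecidablePred P] (m n : Nat) (hmn : m ≤ n)
    (h : ∀ k, m < k → k ≤ n → ¬P k) : Nat.findGreatest P n = Nat.findGreatest P m := by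
  induction n with
  | zero => have : m = 0 := by omega
            subst this; rfl
  | succ n ih =>
    rcases Nat.lt_or_ge m (n + 1) with hlt | hge
    · rw [Nat.findGreatest_succ, if_neg (h (n + 1) hlt le_rfl)]
      exact ih (by omega) (fun k h1 h2 => h k h1 (by omega))
    · have : m = n + 1 := by omega
      subst this; rfl

theorem getD_take_lt (l : List Char) (k p : Nat) (d : Char) (h : p < k) :
    (l.take k).getD p d = l.getD p d := by
  rw [List.getD_eq_getElem?_getD, List.getD_eq_getElem?_getD, List.getElem?_take_of_lt h]

theorem getD_drop' (l : List Char) (n p : Nat) (d : Char) :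
    (l.drop n).getD p d = l.getD (n + p) d := by
  rw [List.getD_eq_getElem?_getD, List.getD_eq_getElem?_getD, List.getElem?_drop]

theorem getD_append_left (l1 l2 : List Char) (p : Nat) (d : Char) (h : p < l1.length) :
    (l1 ++ l2).getD p d = l1.getD p d := by
  rw [List.getD_eq_getElem?_getD, List.getD_eq_getElem?_getD, List.getElem?_append_left h]

theorem getD_sep (s1 s2 : List Char) (d : Char) :
    (s2 ++ '\x00' :: s1).getD s2.length d = '\x00' := by
  rw [List.getD_eq_getElem?_getD, List.getElem?_append_right le_rfl, Nat.sub_self]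
  rfl

theorem getD_right_elem (s1 s2 : List Char) (r : Nat) (d : Char) :
    (s2 ++ '\x00' :: s1).getD (s2.length + 1 + r) d = s1.getD r d := by
  rw [List.getD_eq_getElem?_getD, List.getElem?_append_right (by omega)]
  have h : s2.length + 1 + r - s2.length = r + 1 := by omega
  rw [h, List.getElem?_cons_succ, ← List.getD_eq_getElem?_getD]

theorem getD_mem (l : List Char) (p : Nat) (d : Char) (h : p < l.length) :
    l.getD p d ∈ l := by
  rw [List.getD_eq_getElem?_getD, List.getElem?_eq_getElem h]
  exact List.getElem_mem h

theorem bord_sep (s1 s2 : List Char)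
    (h1 : '\x00' ∉ s1) (h2 : '\x00' ∉ s2) :
    bord (s2 ++ '\x00' :: s1) =
      Nat.findGreatest (fun k => s2.take k = s1.drop (s1.length - k)) (min s1.length s2.length) := by
  have hL : (s2 ++ '\x00' :: s1).length = s2.length + (s1.length + 1) := by
    rw [List.length_append, List.length_cons]
  have hb : (s2 ++ '\x00' :: s1).length - 1 = s2.length + s1.length := by omega
  rw [bord, hb]
  have hnot : ∀ k, min s1.length s2.length < k → k ≤ s2.length + s1.length →
      ¬ ((s2 ++ '\x00' :: s1).take k = (s2 ++ '\x00' :: s1).drop ((s2 ++ '\x00' :: s1).length - k)) := by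
    intro k hkM hkB hPb
    have hgd : ∀ p d, ((s2 ++ '\x00' :: s1).take k).getD p d =
        ((s2 ++ '\x00' :: s1).drop ((s2 ++ '\x00' :: s1).length - k)).getD p d := by
      intro p d; rw [hPb]
    rcases Nat.lt_or_ge s2.length k with hcase | hcase
    · have hA := hgd s2.length ' '
      rw [getD_take_lt _ _ _ _ hcase, getD_drop', getD_sep] at hA
      have hq : ((s2 ++ '\x00' :: s1).length - k) + s2.length =
          s2.length + 1 + (s2.length + s1.length - k) := by omega
      rw [hq, getD_right_elem] at hA
      have hr : s2.length + s1.length - k < s1.length := by omega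
      have : s1.getD (s2.length + s1.length - k) ' ' ∈ s1 := getD_mem _ _ _ hr
      rw [← hA] at this
      exact h1 this
    · have hla : s1.length < k := by omega
      have hB := hgd (k - s1.length - 1) ' '
      rw [getD_take_lt _ _ _ _ (by omega), getD_drop'] at hB
      have hq : ((s2 ++ '\x00' :: s1).length - k) + (k - s1.length - 1) = s2.length := by omega
      rw [hq, getD_sep, getD_append_left _ _ _ _ (by omega)] at hB
      have : s2.getD (k - s1.length - 1) ' ' ∈ s2 := getD_mem _ _ _ (by omega)
      rw [hB] at this
      exact h2 this
  rw [findGreatest_eq_of_not _ (min s1.length s2.length) (s2.length + s1.length) (by omega) hnot]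
  apply findGreatest_congr
  intro k hk
  have hk1 : k ≤ s1.length := by omega
  have hk2 : k ≤ s2.length := by omega
  have ht : (s2 ++ '\x00' :: s1).take k = s2.take k :=
    List.take_append_of_le_length hk2
  have hd1 : (s2 ++ '\x00' :: s1).length - k = s2.length + (s1.length + 1 - k) := by omega
  have hd : (s2 ++ '\x00' :: s1).drop ((s2 ++ '\x00' :: s1).length - k) =
      s1.drop (s1.length - k) := by
    rw [hd1, List.drop_append, List.drop_eq_nil_of_le (by omega)]
    have h' : s2.length + (s1.length + 1 - k) - s2.length = (s1.length - k) + 1 := by omega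
    rw [h', List.drop_succ_cons, List.nil_append]
  rw [ht, hd]

theorem gwLoop_eq (s1 s2 : List Char) :
    ∀ l, l ≤ s1.length → l ≤ s2.length →
      gwLoop s1 s2 l =
        (Nat.findGreatest (fun k => s2.take k = s1.drop (s1.length - k)) l : Nat) := by
  intro l
  induction l with
  | zero => intro _ _; simp [gwLoop]
  | succ l ih =>
    intro hl1 hl2
    rw [gwLoop]
    have hcast : ((l : Int) + 1) = (((l + 1 : Nat)) : Int) := by push_cast; ring
    rw [hcast, PySem.List.slice_to_natCast, PySem.List.slice_from_neg_natCast s1 (l + 1) (by omega),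
      Nat.findGreatest_succ]
    by_cases h : s2.take (l + 1) = s1.drop (s1.length - (l + 1))
    · rw [if_pos h, if_pos h]
    · rw [if_neg h, if_neg h]
      exact ih (by omega) (by omega)

theorem sep_not_mem (s : String) (h : pvDomStr s = true) : '\x00' ∉ s.toList := by
  intro hm
  have := List.all_eq_true.mp h _ hm
  simp [pvDomChar, Char.toNat] at this

theorem get_weight_eq_overlap_alt (s1 s2 : String)
    (h1 : pvDomStr s1 = true) (h2 : pvDomStr s2 = true) :
    get_weight s1 s2 = overlap_alt s1 s2 := by
  rw [get_weight, overlap_alt_eq_bord,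
    bord_sep s1.toList s2.toList (sep_not_mem s1 h1) (sep_not_mem s2 h2),
    gwLoop_eq s1.toList s2.toList (min s1.toList.length s2.toList.length)
      (Nat.min_le_left _ _) (Nat.min_le_right _ _)]

-- ===== VERDICT (by name: the statement is the Claim_ definition above) =====
theorem dir_graph_spec : Claim_equal_dir_graph := by
  intro l t hdom
  unfold Spec_dir_graph dir_graph dir_graph_alt
  have hall : ∀ x ∈ l, pvDomStr x = true := by
    have := (Bool.and_eq_true _ _).mp hdom |>.1
    exact fun x hx => List.all_eq_true.mp this x hx
  have : ∀ (g : PySem.Dict (String × String) Int),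
      l.foldl (fun g i =>
        l.foldl (fun g j =>
          if i ≠ j then
            let weight := get_weight i j
            if weight ≥ t then g.insert (i, j) weight else g
          else g) g) g =
      l.foldl (fun g i =>
        l.foldl (fun g j =>
          if i ≠ j then
            let weight := overlap_alt i j
            if weight ≥ t then g.insert (i, j) weight else g
          else g) g) g := by
    intro g
    apply PySem.List.foldl_congr_mem
    intro acc i hi
    apply PySem.List.foldl_congr_mem
    intro acc2 j hj
    by_cases hij : i ≠ j
    · rw [if_pos hij, if_pos hij,
        get_weight_eq_overlap_alt i j (hall i hi) (hall j hj)]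
    · rw [if_neg hij, if_neg hij]
  rw [this]
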